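-- pv_equiv track=rewrite | github.com/junwei567/Mini-Projects | Python-Calendar/calendar.py | construct_cal_month
-- ===== SOURCE A (Python) =====
-- def construct_cal_month(month_num, first_day_of_month, num_days_in_month):
--     month_names = {1: 'January', 2: 'February', 3: 'March', 4: 'April', 5: 'May', 6: 'June', 7: 'July', 8: 'August', 9: 'September', 10: 'October', 11: 'November', 12: 'December'}
--     week = []
--     for spacing in range(first_day_of_month):
--         week.append('   ')
--     display_day = '  S  M  T  W  T  F  S'
--     cal_list = [month_names[month_num]]
--     for date_num in range(1, num_days_in_month + 1):
--         if len(week) == 7: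
--             cal_list.append(''.join(week))
--             week = []
--         week.append(str(date_num).rjust(3))
--     cal_list.append(''.join(week)) # to add last week
--     return(cal_list) #cal_list is a list of strings, with each entry refering to a new line in a calender
-- ===== SOURCE B (Python) =====
-- def construct_cal_month(month_num, first_day_of_month, num_days_in_month):
--     month_names = {1: 'January', 2: 'February', 3: 'March', 4: 'April', 5: 'May', 6: 'June', 7: 'July', 8: 'August', 9: 'September', 10: 'October', 11: 'November', 12: 'December'}
--     cells = ['   '] * first_day_of_month + [str(d).rjust(3) for d in range(1, num_days_in_month + 1)]
--     weeks = [''.join(cells[i:i + 7]) for i in range(0, len(cells), 7)]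
--     return [month_names[month_num]] + (weeks or [''])
-- ===== Notes on version B (the rewrite author's own statement) =====
-- stated objective: simpler
-- what changed: Replaces A's stateful week-buffer loop (append, flush at length 7, trailing flush) by building the flat cell list up front (blank padding ++ formatted day numbers) and slicing it into 7-cell chunks, with a single guard producing the one empty week line when there are no cells.
-- intended difference: On inputs with first_day_of_month > 7 (an out-of-range weekday offset; real offsets are 0..6), A returns every cell crammed into one over-long line because its week buffer is only flushed when its length is exactly 7, while B wraps them into 7-cell week lines, the intended calendar layout. — e.g. on construct_cal_month(5, 8, 0): A returns ["May", " "], B returns ["May", " ", " "]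
import Mathlib
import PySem

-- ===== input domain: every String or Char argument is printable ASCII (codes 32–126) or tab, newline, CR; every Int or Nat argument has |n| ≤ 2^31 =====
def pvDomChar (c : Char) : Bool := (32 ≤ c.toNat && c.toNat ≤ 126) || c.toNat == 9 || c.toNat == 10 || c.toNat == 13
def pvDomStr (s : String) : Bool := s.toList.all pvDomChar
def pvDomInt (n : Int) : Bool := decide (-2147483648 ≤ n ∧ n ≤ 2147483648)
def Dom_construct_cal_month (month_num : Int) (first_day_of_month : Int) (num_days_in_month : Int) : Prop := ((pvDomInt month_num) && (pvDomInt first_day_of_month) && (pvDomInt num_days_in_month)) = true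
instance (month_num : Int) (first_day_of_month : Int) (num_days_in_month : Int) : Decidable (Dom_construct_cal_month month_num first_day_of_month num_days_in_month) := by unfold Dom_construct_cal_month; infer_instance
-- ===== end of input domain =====

-- B rebuilds the month header plus week lines by flat-list construction and 7-wide chunking instead of A's
-- stateful week-accumulator loop (objective: simpler); intended difference D_: for weekday offsets > 7 A emits
-- one over-long line where B wraps into 7-cell weeks.

-- ===== PORT A =====
-- shared helpers: both Pythons contain the identical month_names dict literal and the identical
-- 'str(date_num).rjust(3)' expression.
def pvMonthNames : PySem.Dict Int String :=
  PySem.Dict.ofList [(1, "January"), (2, "February"), (3, "March"), (4, "April"), (5, "May"),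
    (6, "June"), (7, "July"), (8, "August"), (9, "September"), (10, "October"),
    (11, "November"), (12, "December")]

-- str(d).rjust(3): hand port, exact — pads with spaces on the left to width 3 (unchanged when already ≥ 3 chars).
def pvRjust3 (d : Int) : String :=
  let cs := PySem.Int.toChars d
  String.ofList (List.replicate (3 - cs.length) ' ' ++ cs)

-- Port of A. month_names[month_num] raises KeyError when get? is none: those inputs are excluded by Pre_
-- (the .getD "" default is never reached inside Pre_).
def construct_cal_month (month_num : Int) (first_day_of_month : Int) (num_days_in_month : Int) : List String :=
  let week : List String := (PySem.List.pyRange 0 first_day_of_month 1).foldl (fun w _ => w ++ ["   "]) []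
  let _display_day := "  S  M  T  W  T  F  S"
  let cal_list : List String := [(PySem.Dict.get? pvMonthNames month_num).getD ""]
  let st := (PySem.List.pyRange 1 (num_days_in_month + 1) 1).foldl
    (fun (s : List String × List String) date_num =>
      if s.1.length == 7 then ([pvRjust3 date_num], s.2 ++ [PySem.Str.join "" s.1])
      else (s.1 ++ [pvRjust3 date_num], s.2))
    (week, cal_list)
  st.2 ++ [PySem.Str.join "" st.1]

-- ===== PORT B =====
def construct_cal_month_alt (month_num : Int) (first_day_of_month : Int) (num_days_in_month : Int) : List String :=
  let cells : List String :=
    PySem.List.pyRepeat ["   "] first_day_of_month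
      ++ (PySem.List.pyRange 1 (num_days_in_month + 1) 1).map pvRjust3
  let weeks : List String :=
    (PySem.List.pyRange 0 (cells.length : Int) 7).map
      (fun i => PySem.Str.join "" (PySem.List.slice cells (some i) (some (i + 7))))
  [(PySem.Dict.get? pvMonthNames month_num).getD ""] ++ (if weeks = [] then [""] else weeks)

-- ===== PRECONDITION & SPEC =====
-- Pre_ excludes exactly month_num outside 1..12, where A raises KeyError on the month_names lookup.
def Pre_construct_cal_month (month_num : Int) (first_day_of_month : Int) (num_days_in_month : Int) : Prop :=
  1 ≤ month_num ∧ month_num ≤ 12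
instance (month_num : Int) (first_day_of_month : Int) (num_days_in_month : Int) : Decidable (Pre_construct_cal_month month_num first_day_of_month num_days_in_month) := by unfold Pre_construct_cal_month; infer_instance
def pvWitness_construct_cal_month : Int × Int × Int := (5, 3, 31)

-- On inputs with first_day_of_month > 7 (an out-of-range weekday offset; real offsets are 0..6) A returns all
-- cells crammed into ONE over-long line, because its week buffer is flushed only when its length is exactly 7;
-- B wraps them into 7-cell week lines, the intended calendar layout.
def D_construct_cal_month (month_num : Int) (first_day_of_month : Int) (num_days_in_month : Int) : Prop :=
  7 < first_day_of_month
instance (month_num : Int) (first_day_of_month : Int) (num_days_in_month : Int) : Decidable (D_construct_cal_month month_num first_day_of_month num_days_in_month) := by unfold D_construct_cal_month; infer_instance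

def Spec_construct_cal_month (month_num : Int) (first_day_of_month : Int) (num_days_in_month : Int) (out : List String) : Prop := ¬ D_construct_cal_month month_num first_day_of_month num_days_in_month → out = construct_cal_month_alt month_num first_day_of_month num_days_in_month
instance (month_num : Int) (first_day_of_month : Int) (num_days_in_month : Int) (out : List String) : Decidable (Spec_construct_cal_month month_num first_day_of_month num_days_in_month out) := by unfold Spec_construct_cal_month; infer_instance

def pvDiffWitness_construct_cal_month : Int × Int × Int := (5, 8, 0)
def pvDiffWitnessOut_construct_cal_month : (List String) × (List String) :=
  (["May", "                        "], ["May", "                     ", "   "])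

-- ===== CLAIM (what is proved, stated in full; the proofs are below) =====
def Claim_unchanged_construct_cal_month : Prop := ∀ (month_num : Int) (first_day_of_month : Int) (num_days_in_month : Int), Dom_construct_cal_month month_num first_day_of_month num_days_in_month → Pre_construct_cal_month month_num first_day_of_month num_days_in_month → Spec_construct_cal_month month_num first_day_of_month num_days_in_month (construct_cal_month month_num first_day_of_month num_days_in_month)
def Claim_changed_construct_cal_month : Prop := Dom_construct_cal_month (pvDiffWitness_construct_cal_month.1) (pvDiffWitness_construct_cal_month.2.1) (pvDiffWitness_construct_cal_month.2.2) ∧ Pre_construct_cal_month (pvDiffWitness_construct_cal_month.1) (pvDiffWitness_construct_cal_month.2.1) (pvDiffWitness_construct_cal_month.2.2) ∧ D_construct_cal_month (pvDiffWitness_construct_cal_month.1) (pvDiffWitness_construct_cal_month.2.1) (pvDiffWitness_construct_cal_month.2.2) ∧ construct_cal_month (pvDiffWitness_construct_cal_month.1) (pvDiffWitness_construct_cal_month.2.1) (pvDiffWitness_construct_cal_month.2.2) = pvDiffWitnessOut_construct_cal_month.1 ∧ construct_cal_month_alt (pvDiffWitness_construct_cal_month.1) (pvDiffWitness_construct_cal_month.2.1)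 (pvDiffWitness_construct_cal_month.2.2) = pvDiffWitnessOut_construct_cal_month.2 ∧ pvDiffWitnessOut_construct_cal_month.1 ≠ pvDiffWitnessOut_construct_cal_month.2
def Claim_exact_construct_cal_month : Prop := ∀ (month_num : Int) (first_day_of_month : Int) (num_days_in_month : Int), Dom_construct_cal_month month_num first_day_of_month num_days_in_month → Pre_construct_cal_month month_num first_day_of_month num_days_in_month → D_construct_cal_month month_num first_day_of_month num_days_in_month → construct_cal_month month_num first_day_of_month num_days_in_month ≠ construct_cal_month_alt month_num first_day_of_month num_days_in_month

-- ===== LEMMAS AND PROOFS =====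

-- the 7-wide chunking of a flat cell list
def pvChunks7 (l : List String) : List String :=
  if l = [] then [] else PySem.Str.join "" (l.take 7) :: pvChunks7 (l.drop 7)
termination_by l.length
decreasing_by
  simp only [List.length_drop]
  have := List.length_pos_iff.mpr (by assumption : l ≠ [])
  omega

-- A's loop body, named so the fold can be rewritten
def pvStep (s : List String × List String) (date_num : Int) : List String × List String :=
  if s.1.length == 7 then ([pvRjust3 date_num], s.2 ++ [PySem.Str.join "" s.1])
  else (s.1 ++ [pvRjust3 date_num], s.2)

-- A's week loop, written as a recursion on the remaining cells
def pvChunkAux (w : List String) (l : List String) : List String :=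
  match l with
  | [] => [PySem.Str.join "" w]
  | c :: cs =>
    if w.length == 7 then PySem.Str.join "" w :: pvChunkAux [c] cs
    else pvChunkAux (w ++ [c]) cs

theorem pvFoldl_eq_chunkAux (l : List Int) (w cl : List String) :
    (l.foldl pvStep (w, cl)).2 ++ [PySem.Str.join "" (l.foldl pvStep (w, cl)).1]
      = cl ++ pvChunkAux w (l.map pvRjust3) := by
  induction l generalizing w cl with
  | nil => simp [pvChunkAux]
  | cons d ds ih =>
    rw [List.foldl_cons]
    by_cases h : w.length = 7
    · rw [show pvStep (w, cl) d = ([pvRjust3 d], cl ++ [PySem.Str.join "" w]) from by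
        simp [pvStep, h]]
      rw [ih]
      simp [pvChunkAux, h]
    · rw [show pvStep (w, cl) d = (w ++ [pvRjust3 d], cl) from by simp [pvStep, h]]
      rw [ih]
      simp [pvChunkAux, h]

theorem pvChunkAux_eq_chunks7 (l : List String) (w : List String) (hw : w.length ≤ 7) :
    pvChunkAux w l = if w ++ l = [] then [""] else pvChunks7 (w ++ l) := by
  induction l generalizing w with
  | nil =>
    rcases eq_or_ne w [] with rfl | hne
    · simp [pvChunkAux]; rfl
    · rw [pvChunkAux]
      simp only [List.append_nil, hne, if_false]
      rw [pvChunks7.eq_def]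
      simp [hne, List.take_of_length_le hw, List.drop_eq_nil_of_le hw, pvChunks7]
  | cons c cs ih =>
    rw [pvChunkAux]
    by_cases h : w.length = 7
    · simp only [h, beq_self_eq_true, if_true]
      rw [ih [c] (by simp), if_neg (by simp : ¬([c] ++ cs = [])), List.singleton_append]
      have hnil : ¬(w ++ c :: cs = []) := by simp
      rw [if_neg hnil]
      conv_rhs => rw [pvChunks7.eq_def]
      rw [if_neg hnil, List.take_left' h, List.drop_left' h]
    · have hb : (w.length == 7) = false := by simpa using h
      rw [hb, if_neg (by simp), ih (w ++ [c]) (by simp; omega)]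
      simp

theorem pvChunks7_eq_nil_iff (l : List String) : pvChunks7 l = [] ↔ l = [] := by
  rw [pvChunks7.eq_def]; split <;> simp_all

theorem pvMap_range_eq_chunks7_aux (n : Nat) : ∀ (l : List String), l.length ≤ n →
    (List.range ((l.length + 6) / 7)).map
        (fun k => PySem.Str.join "" ((l.drop (7 * k)).take 7)) = pvChunks7 l := by
  induction n with
  | zero =>
    intro l hl
    have : l = [] := List.eq_nil_of_length_eq_zero (by omega)
    subst this
    simp [pvChunks7]
  | succ n ih =>
    intro l hl
    rcases eq_or_ne l [] with rfl | hne
    · simp [pvChunks7]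
    · rw [pvChunks7.eq_def, if_neg hne]
      have hlen : 0 < l.length := List.length_pos_iff.mpr hne
      have hm : (l.length + 6) / 7 = (l.length - 7 + 6) / 7 + 1 := by omega
      have htail := ih (l.drop 7) (by simp only [List.length_drop]; omega)
      simp only [List.length_drop] at htail
      rw [hm, List.range_succ_eq_map, List.map_cons, List.map_map, ← htail]
      refine congrArg₂ List.cons (by simp) ?_
      refine List.map_congr_left (fun k hk => ?_)
      simp only [Function.comp_apply, List.drop_drop]
      rw [show 7 * (k + 1) = 7 + 7 * k from by omega]

theorem pvWeeks_eq_chunks7 (l : List String) :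
    (PySem.List.pyRange 0 (l.length : Int) 7).map
        (fun i => PySem.Str.join "" (PySem.List.slice l (some i) (some (i + 7)))) = pvChunks7 l := by
  rw [PySem.List.pyRange_of_pos 0 (l.length : Int) (by norm_num)]
  rw [List.map_map, ← pvMap_range_eq_chunks7_aux l.length l le_rfl]
  have hcnt : (if (0:Int) < (l.length : Int) then (((l.length : Int) - 0 + 7 - 1) / 7).toNat else 0)
      = (l.length + 6) / 7 := by split <;> omega
  rw [hcnt]
  apply List.map_congr_left
  intro k _
  simp only [Function.comp_apply, zero_add]
  rw [show (7 : Int) * (k : Int) = ((7 * k : Nat) : Int) from by push_cast; ring]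
  rw [show ((7 * k : Nat) : Int) + 7 = ((7 * k : Nat) : Int) + ((7 : Nat) : Int) from by norm_num]
  rw [PySem.List.slice_natCast_add]

-- no flush ever happens once the week buffer is longer than 7 (used for the tightness theorem)
theorem pvFoldl_noflush (l : List Int) (w cl : List String) (hw : 7 < w.length) :
    l.foldl pvStep (w, cl) = (w ++ l.map pvRjust3, cl) := by
  induction l generalizing w with
  | nil => simp
  | cons d ds ih =>
    rw [List.foldl_cons,
      show pvStep (w, cl) d = (w ++ [pvRjust3 d], cl) from by
        simp [pvStep]; omega,
      ih (w ++ [pvRjust3 d]) (by simp; omega)]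
    simp

theorem pvChunks7_two_le (l : List String) (hl : 8 ≤ l.length) :
    2 ≤ (pvChunks7 l).length := by
  rw [pvChunks7.eq_def, if_neg (by intro h; subst h; simp at hl)]
  rw [pvChunks7.eq_def, if_neg (by
    intro h
    have := congrArg List.length h
    simp at this
    omega)]
  simp

-- ===== VERDICT (by name: the statement is the Claim_ definition above) =====
theorem construct_cal_month_spec : Claim_unchanged_construct_cal_month := by
  unfold Claim_unchanged_construct_cal_month
  intro m fd nd _ _hpre
  unfold Spec_construct_cal_month
  intro hnd
  have h3 : fd ≤ 7 := by unfold D_construct_cal_month at hnd; omega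
  unfold construct_cal_month construct_cal_month_alt
  simp only []
  have hweek : (PySem.List.pyRange 0 fd 1).foldl (fun w _ => w ++ ["   "]) ([] : List String)
      = List.replicate fd.toNat "   " := by
    rw [PySem.List.foldl_append_singleton_eq_map (f := fun _ => "   ")]
    simp [List.map_const', PySem.List.length_pyRange_one]
  have hstep : (fun (s : List String × List String) date_num =>
      if s.1.length == 7 then ([pvRjust3 date_num], s.2 ++ [PySem.Str.join "" s.1])
      else (s.1 ++ [pvRjust3 date_num], s.2)) = pvStep := rfl
  rw [hweek, hstep, PySem.List.pyRepeat_singleton, pvFoldl_eq_chunkAux,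
    pvWeeks_eq_chunks7,
    pvChunkAux_eq_chunks7 _ _ (by simp; omega)]
  by_cases hc : List.replicate fd.toNat "   " ++ (PySem.List.pyRange 1 (nd + 1) 1).map pvRjust3 = []
  · rw [hc]
    simp [(pvChunks7_eq_nil_iff []).mpr rfl]
  · rw [if_neg hc, if_neg ((not_iff_not.mpr (pvChunks7_eq_nil_iff _)).mpr hc)]

theorem construct_cal_month_changed : Claim_changed_construct_cal_month := by
  unfold Claim_changed_construct_cal_month; decide

theorem construct_cal_month_tight : Claim_exact_construct_cal_month := by
  unfold Claim_exact_construct_cal_month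
  intro m fd nd _ _hpre hd heq
  unfold D_construct_cal_month at hd
  have hlen := congrArg List.length heq
  unfold construct_cal_month construct_cal_month_alt at hlen
  simp only [] at hlen
  rw [show (fun (s : List String × List String) date_num =>
      if s.1.length == 7 then ([pvRjust3 date_num], s.2 ++ [PySem.Str.join "" s.1])
      else (s.1 ++ [pvRjust3 date_num], s.2)) = pvStep from rfl] at hlen
  rw [PySem.List.foldl_append_singleton_eq_map (f := fun _ => "   ")] at hlen
  rw [show ((PySem.List.pyRange 0 fd 1).map (fun _ => "   ")) = List.replicate fd.toNat "   " from by
    simp [List.map_const', PySem.List.length_pyRange_one]] at hlen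
  rw [pvFoldl_noflush _ _ _ (by simp; omega)] at hlen
  rw [PySem.List.pyRepeat_singleton, pvWeeks_eq_chunks7] at hlen
  have h8 : 8 ≤ (List.replicate fd.toNat "   " ++ (PySem.List.pyRange 1 (nd + 1) 1).map pvRjust3).length := by
    simp
    omega
  have h2 := pvChunks7_two_le _ h8
  have hne : ¬ (pvChunks7 (List.replicate fd.toNat "   " ++ (PySem.List.pyRange 1 (nd + 1) 1).map pvRjust3) = []) := by
    intro h
    rw [h] at h2
    simp at h2
  rw [if_neg hne] at hlen
  simp at hlen
  omega
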